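-- pv_equiv track=rewrite | github.com/liyuyaoo/smart-SXN-screener | Module 1 Flavonoid Theoretical Library Builder & Candidate Compound Matcher.py | format_formula
-- ===== SOURCE A (Python) =====
-- def format_formula(elements_dict):
--     # 定义元素输出顺序
--     element_order = ['C', 'H', 'O', 'N', 'S', 'P']
--     formula_parts = []
--
--     for element in element_order:
--         if element in elements_dict and elements_dict[element] > 0:
--             count = elements_dict[element]
--             formula_parts.append(f"{element}{count if count > 1 else ''}")
--
--     # 添加可能不在预设顺序中的元素
--     for element, count in elements_dict.items():
--         if element not in element_order and count > 0:
--             formula_parts.append(f"{element}{count if count > 1 else ''}")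
--
--     return ''.join(formula_parts)
-- ===== SOURCE B (Python) =====
-- def format_formula(elements_dict):
--     # Single-pass grouping: tag each positive-count item with a priority index
--     # (0..5 for C,H,O,N,S,P; 6 for anything else), bucket the formatted parts
--     # by that index in one pass, then emit the buckets in index order.
--     element_order = ['C', 'H', 'O', 'N', 'S', 'P']
--     prio = {e: i for i, e in enumerate(element_order)}
--     sentinel = len(element_order)
--     groups = {}
--     for element, count in elements_dict.items():
--         if count > 0:
--             part = f"{element}{count if count > 1 else ''}"
--             groups.setdefault(prio.get(element, sentinel), []).append(part)
--     return ''.join(part for k in range(sentinel + 1) for part in groups.get(k, []))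
-- ===== Notes on version B (the rewrite author's own statement) =====
-- stated objective: alternative
-- what changed: Replaces A's two separate passes (a scan over the fixed priority list with a dict lookup per element, then a remainder scan over the dict) by one pass over the dict items that buckets formatted parts under a priority index (0..5 for C,H,O,N,S,P, sentinel 6 for the rest), emitting the buckets in index order.
import Mathlib
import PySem

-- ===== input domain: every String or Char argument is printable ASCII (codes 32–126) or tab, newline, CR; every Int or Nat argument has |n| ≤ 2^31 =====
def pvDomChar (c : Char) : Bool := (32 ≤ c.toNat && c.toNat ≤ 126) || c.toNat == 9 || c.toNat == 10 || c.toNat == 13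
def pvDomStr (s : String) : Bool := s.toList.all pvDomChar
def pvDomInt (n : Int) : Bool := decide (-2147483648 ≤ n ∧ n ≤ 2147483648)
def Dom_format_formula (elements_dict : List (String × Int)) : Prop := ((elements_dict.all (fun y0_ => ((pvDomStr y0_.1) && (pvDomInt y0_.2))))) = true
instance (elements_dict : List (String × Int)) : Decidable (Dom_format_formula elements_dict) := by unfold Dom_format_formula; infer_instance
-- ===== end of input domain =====

-- B replaces A's two passes (priority-list scan with lookups, then a remainder scan)
-- by one bucketing pass over the items keyed by a priority index; same return value.

-- shared formatting helper: the f-string f"{element}{count if count > 1 else ''}"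
def pvFmt (e : String) (c : Int) : String := e ++ (if 1 < c then PySem.Int.toStr c else "")

-- ===== PORT A =====
def format_formula (elements_dict : List (String × Int)) : String :=
  let d := PySem.Dict.ofList elements_dict
  let element_order : List String := ["C", "H", "O", "N", "S", "P"]
  -- first loop: over the fixed order, membership test + lookup
  let parts1 := element_order.foldl (fun acc e =>
      if d.contains e && decide (0 < d.getD e 0) then acc ++ [pvFmt e (d.getD e 0)] else acc) []
  -- second loop: items not in the preset order
  let parts := d.items.foldl (fun acc p =>
      if !(["C", "H", "O", "N", "S", "P"] : List String).contains p.1 && decide (0 < p.2) then acc ++ [pvFmt p.1 p.2] else acc) parts1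
  PySem.Str.join "" parts

-- ===== PORT B =====
-- B-side helper: prio.get(element, 6) — index in the order list, sentinel 6 otherwise
def pvPrio (e : String) : Int :=
  match PySem.List.index? ["C", "H", "O", "N", "S", "P"] e with
  | some i => (i : Int)
  | none => 6

def format_formula_alt (elements_dict : List (String × Int)) : String :=
  let d := PySem.Dict.ofList elements_dict
  let groups := d.items.foldl (fun (g : PySem.Dict Int (List String)) p =>
      if 0 < p.2 then g.modify (pvPrio p.1) [] (· ++ [pvFmt p.1 p.2]) else g) PySem.Dict.empty
  PySem.Str.join "" ((PySem.List.pyRange 0 7 1).flatMap (fun k => groups.getD k []))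

-- ===== PRECONDITION & SPEC =====
def Spec_format_formula (elements_dict : List (String × Int)) (out : String) : Prop := out = format_formula_alt elements_dict
instance (elements_dict : List (String × Int)) (out : String) : Decidable (Spec_format_formula elements_dict out) := by unfold Spec_format_formula; infer_instance

-- ===== CLAIM (what is proved, stated in full; the proofs are below) =====
def Claim_equal_format_formula : Prop := ∀ (elements_dict : List (String × Int)), Dom_format_formula elements_dict → Spec_format_formula elements_dict (format_formula elements_dict)

-- ===== LEMMAS AND PROOFS =====

-- the per-key formatted contribution of an items list (A groups by key name)
def pvTl (l : List (String × Int)) (e : String) : List String :=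
  (l.filter (fun p => p.1 == e && decide (0 < p.2))).map (fun p => pvFmt p.1 p.2)

-- the per-priority formatted contribution of an items list (B groups by priority)
def pvGl (l : List (String × Int)) (k : Int) : List String :=
  (l.filter (fun p => decide (0 < p.2) && (pvPrio p.1 == k))).map (fun p => pvFmt p.1 p.2)

theorem pv_filter_key_of_mem {l : List (String × Int)} {e : String} {v : Int}
    (q : String × Int → Bool) (hnd : (l.map Prod.fst).Nodup) (hm : (e, v) ∈ l) :
    l.filter (fun p => p.1 == e && q p) = if q (e, v) then [(e, v)] else [] := by
  induction l with
  | nil => cases hm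
  | cons a t ih =>
    simp only [List.map_cons, List.nodup_cons] at hnd
    rcases List.mem_cons.1 hm with h | h
    · subst h
      have ht : t.filter (fun p => p.1 == e && q p) = [] := by
        apply List.filter_eq_nil_iff.2
        intro p hp hbe
        have he : p.1 = e := by
          simp only [Bool.and_eq_true, beq_iff_eq] at hbe
          exact hbe.1
        exact hnd.1 (by exact he ▸ List.mem_map.2 ⟨p, hp, rfl⟩)
      by_cases hq : q (e, v) = true
      · simp [hq, ht]
      · simp [Bool.eq_false_iff.2 hq, ht]
    · have hne : a.1 ≠ e := by
        intro hae
        exact hnd.1 (by exact hae ▸ List.mem_map.2 ⟨(e, v), h, rfl⟩)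
      simp [hne, ih hnd.2 h]

theorem pv_filter_key_of_none {l : List (String × Int)} {e : String}
    (q : String × Int → Bool) (hn : ∀ p ∈ l, p.1 ≠ e) :
    l.filter (fun p => p.1 == e && q p) = [] := by
  apply List.filter_eq_nil_iff.2
  intro p hp hbe
  simp only [Bool.and_eq_true, beq_iff_eq] at hbe
  exact hn p hp hbe.1

-- one element of A's first loop equals the key-group of the items list
theorem pv_unit (d : PySem.Dict String Int) (hnd : d.keys.Nodup) (e : String) :
    (if d.contains e && decide (0 < d.getD e 0) then [pvFmt e (d.getD e 0)] else [])
      = pvTl d.items e := by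
  cases h : d.get? e with
  | none =>
    have hc : d.contains e = false := by
      rw [PySem.Dict.contains_eq_isSome_get?, h]; rfl
    have hn : ∀ p ∈ d.items, p.1 ≠ e := by
      intro p hp hpe
      exact ((PySem.Dict.get?_eq_none_iff_not_mem_keys d e).1 h)
        (hpe ▸ List.mem_map.2 ⟨p, hp, rfl⟩)
    simp [pvTl, pv_filter_key_of_none _ hn, hc]
  | some v =>
    have hc : d.contains e = true := by
      rw [PySem.Dict.contains_eq_isSome_get?, h]; rfl
    have hg : d.getD e 0 = v := PySem.Dict.getD_of_get?_eq_some d 0 h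
    have hmem : (e, v) ∈ d.items := PySem.Dict.mem_items_of_get?_eq_some d h
    have hnd' : (d.items.map Prod.fst).Nodup := hnd
    rw [pvTl, pv_filter_key_of_mem _ hnd' hmem]
    by_cases hv : 0 < v
    · simp [hc, hg, hv]
    · simp [hc, hg, hv]

-- A's first loop, in filter/map form, is the concatenation of key-groups
theorem pv_order_loop (d : PySem.Dict String Int) (hnd : d.keys.Nodup) (os : List String) :
    (os.filter (fun e => d.contains e && decide (0 < d.getD e 0))).map (fun e => pvFmt e (d.getD e 0))
      = os.flatMap (pvTl d.items) := by
  induction os with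
  | nil => rfl
  | cons e rest ih =>
    rw [List.flatMap_cons, ← pv_unit d hnd e]
    by_cases hc : (d.contains e && decide (0 < d.getD e 0)) = true
    · simp [hc, ih]
    · simp [Bool.eq_false_iff.2 hc, ih]

-- B's bucket dict: the bucket at k holds the priority-k group, in item order
theorem pv_getD_groups (l : List (String × Int)) (g : PySem.Dict Int (List String)) (k : Int) :
    (l.foldl (fun g p => if 0 < p.2 then g.modify (pvPrio p.1) [] (· ++ [pvFmt p.1 p.2]) else g) g).getD k []
      = g.getD k [] ++ pvGl l k := by
  induction l generalizing g with
  | nil => simp [pvGl]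
  | cons p t ih =>
    rw [List.foldl_cons, ih]
    by_cases hp : 0 < p.2
    · rw [if_pos hp]
      by_cases hk : k = pvPrio p.1
      · simp [pvGl, hk, hp]
      · have : (pvPrio p.1 == k) = false :=
          beq_eq_false_iff_ne.2 (fun h => hk h.symm)
        simp [pvGl, PySem.Dict.getD_modify, hk, this]
    · have : ¬ (decide (0 < p.2) && (pvPrio p.1 == k)) = true := by simp [hp]
      simp [pvGl, hp]

-- priority k < 6 means "the key is exactly order[k]"
theorem pv_prio_eq_index (s : String) (i : Nat) (hi : i < 6) :
    (pvPrio s == ((i : Nat) : Int)) = (s == (["C", "H", "O", "N", "S", "P"] : List String)[i]'(by simpa using hi)) := by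
  unfold pvPrio
  cases h : PySem.List.index? (["C", "H", "O", "N", "S", "P"] : List String) s with
  | none =>
    have hs : s ∉ (["C", "H", "O", "N", "S", "P"] : List String) :=
      (PySem.List.index?_eq_none_iff _ _).1 h
    have hne : s ≠ (["C", "H", "O", "N", "S", "P"] : List String)[i]'(by simpa using hi) := by
      intro he; exact hs (he ▸ List.getElem_mem _)
    have h6 : ((6 : Int) == ((i : Nat) : Int)) = false := by
      simp; omega
    simp [hne, h6]
  | some j =>
    obtain ⟨hj, hsj, -⟩ := PySem.List.getElem_of_index?_eq_some h
    have hnd : (["C", "H", "O", "N", "S", "P"] : List String).Nodup := by decide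
    have : (s = (["C", "H", "O", "N", "S", "P"] : List String)[i]'(by simpa using hi)) ↔ j = i := by
      rw [← hsj]
      exact hnd.getElem_inj_iff
    simp only []
    by_cases hji : j = i
    · simp [hji, this]
    · have : ¬ s = (["C", "H", "O", "N", "S", "P"] : List String)[i]'(by simpa using hi) :=
        fun he => hji (this.1 he)
      simp [this, hji]
  
-- priority 6 means "not one of the six named elements"
theorem pv_prio_eq_six (s : String) :
    (pvPrio s == (6 : Int)) = !(["C", "H", "O", "N", "S", "P"] : List String).contains s := by
  unfold pvPrio
  cases h : PySem.List.index? (["C", "H", "O", "N", "S", "P"] : List String) s with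
  | none =>
    have hs : s ∉ (["C", "H", "O", "N", "S", "P"] : List String) :=
      (PySem.List.index?_eq_none_iff _ _).1 h
    simp [hs]
  | some j =>
    obtain ⟨hj, hsj, -⟩ := PySem.List.getElem_of_index?_eq_some h
    have hs : s ∈ (["C", "H", "O", "N", "S", "P"] : List String) := hsj ▸ List.getElem_mem _
    have hj6 : ((j : Int) == (6 : Int)) = false := by
      simp only [List.length_cons, List.length_nil] at hj
      simp; omega
    simp [hs, hj6]

-- B's priority-k group, k < 6, is A's key-group at order[k]
theorem pv_G_named (l : List (String × Int)) (i : Nat) (hi : i < 6) :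
    pvGl l ((i : Nat) : Int) = pvTl l ((["C", "H", "O", "N", "S", "P"] : List String)[i]'(by simpa using hi)) := by
  unfold pvGl pvTl
  congr 1
  apply List.filter_congr
  intro p _
  rw [pv_prio_eq_index p.1 i hi, Bool.and_comm]

-- B's sentinel group is exactly A's remainder scan
theorem pv_G_six (l : List (String × Int)) :
    pvGl l (6 : Int)
      = (l.filter (fun p => !(["C", "H", "O", "N", "S", "P"] : List String).contains p.1 && decide (0 < p.2))).map (fun p => pvFmt p.1 p.2) := by
  unfold pvGl
  congr 1
  apply List.filter_congr
  intro p _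
  rw [pv_prio_eq_six p.1, Bool.and_comm]

theorem pv_range7 : PySem.List.pyRange 0 7 1 = [0, 1, 2, 3, 4, 5, 6] := by decide

theorem format_formula_spec : Claim_equal_format_formula := by
  intro xs _
  unfold Spec_format_formula format_formula format_formula_alt
  dsimp only
  rw [PySem.List.foldl_append_if, PySem.List.foldl_append_if, pv_range7]
  have hnd := PySem.Dict.nodup_keys_ofList xs
  rw [List.nil_append, pv_order_loop _ hnd]
  simp only [List.flatMap_cons, List.flatMap_nil, List.append_nil]
  rw [pv_getD_groups, pv_getD_groups, pv_getD_groups, pv_getD_groups, pv_getD_groups,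
      pv_getD_groups, pv_getD_groups]
  simp only [PySem.Dict.getD_empty, List.nil_append]
  have h0 := pv_G_named (PySem.Dict.ofList xs).items 0 (by omega)
  have h1 := pv_G_named (PySem.Dict.ofList xs).items 1 (by omega)
  have h2 := pv_G_named (PySem.Dict.ofList xs).items 2 (by omega)
  have h3 := pv_G_named (PySem.Dict.ofList xs).items 3 (by omega)
  have h4 := pv_G_named (PySem.Dict.ofList xs).items 4 (by omega)
  have h5 := pv_G_named (PySem.Dict.ofList xs).items 5 (by omega)
  norm_num at h0 h1 h2 h3 h4 h5
  rw [h0, h1, h2, h3, h4, h5, pv_G_six]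
  simp [List.append_assoc]
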